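-- pv_equiv track=rewrite | github.com/abbasmoosajee07/AdventofCode | 2018/24/2018Day24.py | clean_unit_data
-- ===== SOURCE A (Python) =====
-- def clean_unit_data(unit_data):
--     """Cleans and formats the raw input data for units."""
--     return [
--         unit.replace(", ", "&")
--             .replace(" units each with ", ",")
--             .replace(" hit points (", ",")
--             .replace(") with an attack that does ", ",")
--             .replace(" damage at initiative ", ",")
--         for unit in unit_data.split("\n")[1:]  # Skip header line
--     ]
-- ===== SOURCE B (Python) =====
-- # Single-pass table-driven scanner: walks each line once, trying the five
-- # phrases at each position (table order), instead of five chained .replace passes.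
-- _TABLE = [
--     (", ", "&"),
--     (" units each with ", ","),
--     (" hit points (", ","),
--     (") with an attack that does ", ","),
--     (" damage at initiative ", ","),
-- ]
--
-- def _reformat(line):
--     buf = []
--     i = 0
--     n = len(line)
--     while i < n:
--         for p, r in _TABLE:
--             if line.startswith(p, i):
--                 buf.append(r)
--                 i += len(p)
--                 break
--         else:
--             buf.append(line[i])
--             i += 1
--     return "".join(buf)
--
-- def clean_unit_data(unit_data):
--     """Cleans and formats the raw input data for units."""
--     return [_reformat(line) for line in unit_data.split("\n")[1:]]
-- ===== Notes on version B (the rewrite author's own statement) =====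
-- stated objective: alternative
-- what changed: B replaces A's five sequential whole-line .replace passes by a single left-to-right table-driven scan of each line that tries the five phrases at every position; Pre_ excludes inputs containing one of the four phrase-overlap substrings (a phrase starting at the trailing space of another phrase's occurrence), where A's pass order and B's single pass defensibly resolve the overlap differently.
import Mathlib
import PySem

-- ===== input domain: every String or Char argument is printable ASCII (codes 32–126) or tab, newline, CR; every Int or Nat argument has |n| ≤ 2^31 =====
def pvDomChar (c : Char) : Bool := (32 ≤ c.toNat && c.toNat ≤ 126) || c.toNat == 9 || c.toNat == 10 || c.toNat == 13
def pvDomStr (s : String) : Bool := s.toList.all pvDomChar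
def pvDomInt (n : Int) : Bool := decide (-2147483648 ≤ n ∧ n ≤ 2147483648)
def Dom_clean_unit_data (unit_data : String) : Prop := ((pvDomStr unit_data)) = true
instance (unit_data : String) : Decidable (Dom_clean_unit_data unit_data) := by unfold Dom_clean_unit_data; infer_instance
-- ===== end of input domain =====

set_option maxRecDepth 4000


-- B replaces A's five chained .replace passes per line by ONE table-driven scan of each line
-- (alternative decomposition, similar cost); return values proved equal on Pre_.

-- ===== PORT A =====
def clean_unit_data (unit_data : String) : List String :=
  (((PySem.Str.split? unit_data "\n").getD []).drop 1).map (fun unit =>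
    PySem.Str.replace
      (PySem.Str.replace
        (PySem.Str.replace
          (PySem.Str.replace
            (PySem.Str.replace unit ", " "&")
            " units each with " ",")
          " hit points (" ",")
        ") with an attack that does " ",")
      " damage at initiative " ",")

-- ===== PORT B =====
-- the phrase table, in Source B's order
def pvTable : List (List Char × List Char) :=
  [(", ".toList, "&".toList),
   (" units each with ".toList, ",".toList),
   (" hit points (".toList, ",".toList),
   (") with an attack that does ".toList, ",".toList),
   (" damage at initiative ".toList, ",".toList)]

-- Source B's inner for-loop: first table entry whose phrase starts at the current position
def pvTry (t : List (List Char × List Char)) (l : List Char) :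
    Option (List Char × List Char) :=
  match t with
  | [] => none
  | (p, q) :: rest =>
      if p ≠ [] ∧ p.isPrefixOf l then some (q, l.drop p.length) else pvTry rest l

-- termination measure for the scanner (cited in decreasing_by)
theorem pvTry_length {t : List (List Char × List Char)} {l r q : List Char}
    (h : pvTry t l = some (q, r)) : r.length < l.length := by
  induction t with
  | nil => simp [pvTry] at h
  | cons hd tl ih =>
    obtain ⟨p, q'⟩ := hd
    simp only [pvTry] at h
    split at h
    · rename_i hc
      obtain ⟨hp, hpre⟩ := hc
      obtain ⟨rfl, rfl⟩ : q' = q ∧ l.drop p.length = r := by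
        simpa using h
      have hple : p.length ≤ l.length :=
        (List.isPrefixOf_iff_prefix.mp hpre).length_le
      have hppos : 0 < p.length := List.length_pos_of_ne_nil hp
      simp only [List.length_drop]
      omega
    · exact ih h

-- Source B's while-loop over one line
def pvScan (t : List (List Char × List Char)) : List Char → List Char
  | [] => []
  | c :: cs =>
    match h : pvTry t (c :: cs) with
    | some (q, rest) => q ++ pvScan t rest
    | none => c :: pvScan t cs
termination_by l => l.length
decreasing_by
  · exact pvTry_length h
  · simp

def clean_unit_data_alt (unit_data : String) : List String :=
  (((PySem.Str.split? unit_data "\n").getD []).drop 1).map (fun line =>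
    String.ofList (pvScan pvTable line.toList))

-- ===== PRECONDITION & SPEC =====
-- the four strings on which two of the five phrases overlap (a later phrase starting
-- at the trailing space of another phrase's occurrence)
def pvBad : List (List Char) :=
  [") with an attack that does units each with ".toList,
   ") with an attack that does hit points (".toList,
   " damage at initiative units each with ".toList,
   " damage at initiative hit points (".toList]

-- Pre_ excludes inputs containing one of the four phrase-overlap substrings, where one phrase's
-- occurrence starts at the trailing space of another's; there the winner of the overlap is an
-- accident of A's pass order and B's single pass resolves it the other way — both are defensible.
def Pre_clean_unit_data (unit_data : String) : Prop :=
  ∀ b ∈ pvBad, ¬ b <:+: unit_data.toList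

instance (unit_data : String) : Decidable (Pre_clean_unit_data unit_data) := by
  unfold Pre_clean_unit_data; infer_instance

def pvWitness_clean_unit_data : String :=
  "Immune System:\n17 units, 5 hp"

def Spec_clean_unit_data (unit_data : String) (out : List String) : Prop := out = clean_unit_data_alt unit_data
instance (unit_data : String) (out : List String) : Decidable (Spec_clean_unit_data unit_data out) := by unfold Spec_clean_unit_data; infer_instance

-- ===== CLAIM (what is proved, stated in full; the proofs are below) =====
def Claim_equal_clean_unit_data : Prop := ∀ (unit_data : String), Dom_clean_unit_data unit_data → Pre_clean_unit_data unit_data → Spec_clean_unit_data unit_data (clean_unit_data unit_data)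

-- ===== LEMMAS AND PROOFS =====

theorem pvTry_nil (t : List (List Char × List Char)) : pvTry t [] = none := by
  induction t with
  | nil => rfl
  | cons hd tl ih =>
    obtain ⟨p, q⟩ := hd
    simp only [pvTry]
    split
    · rename_i hc
      exact absurd (by simpa using hc.2) hc.1
    · exact ih

theorem pvScan_nil (t : List (List Char × List Char)) : pvScan t [] = [] := by
  simp [pvScan]

theorem pvScan_cons_some {t : List (List Char × List Char)} {c : Char} {cs q r : List Char}
    (h : pvTry t (c :: cs) = some (q, r)) : pvScan t (c :: cs) = q ++ pvScan t r := by
  rw [pvScan]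
  split
  · rename_i q' r' h'
    rw [h] at h'
    obtain ⟨rfl, rfl⟩ : q = q' ∧ r = r' := by simpa using h'
    rfl
  · rename_i h'
    rw [h] at h'
    cases h'

theorem pvScan_cons_none {t : List (List Char × List Char)} {c : Char} {cs : List Char}
    (h : pvTry t (c :: cs) = none) : pvScan t (c :: cs) = c :: pvScan t cs := by
  rw [pvScan]
  split
  · rename_i q' r' h'
    rw [h] at h'
    cases h'
  · rfl

theorem pvScan_some {t : List (List Char × List Char)} {l q r : List Char}
    (h : pvTry t l = some (q, r)) : pvScan t l = q ++ pvScan t r := by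
  cases l with
  | nil => rw [pvTry_nil] at h; cases h
  | cons c cs => exact pvScan_cons_some h

theorem pvTry_eq_none_iff {t : List (List Char × List Char)} {l : List Char}
    (ht : ∀ pr ∈ t, pr.1 ≠ []) :
    pvTry t l = none ↔ ∀ pr ∈ t, ¬ pr.1 <+: l := by
  induction t with
  | nil => simp [pvTry]
  | cons hd tl ih =>
    obtain ⟨p, q⟩ := hd
    have hp : p ≠ [] := ht (p, q) List.mem_cons_self
    simp only [pvTry]
    split
    · rename_i hc
      constructor
      · intro h; cases h
      · intro h
        exact absurd (List.isPrefixOf_iff_prefix.mp hc.2) (h (p, q) List.mem_cons_self)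
    · rename_i hc
      have hnpre : ¬ p <+: l := by
        intro hpre
        exact hc ⟨hp, List.isPrefixOf_iff_prefix.mpr hpre⟩
      rw [ih (fun pr hpr => ht pr (List.mem_cons_of_mem _ hpr))]
      constructor
      · intro h pr hpr
        rcases List.mem_cons.mp hpr with rfl | hpr'
        · exact hnpre
        · exact h pr hpr'
      · intro h pr hpr
        exact h pr (List.mem_cons_of_mem _ hpr)

theorem pvTry_some_spec {t : List (List Char × List Char)} {l q r : List Char}
    (h : pvTry t l = some (q, r)) :
    ∃ p, (p, q) ∈ t ∧ p ≠ [] ∧ p <+: l ∧ r = l.drop p.length := by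
  induction t with
  | nil => simp [pvTry] at h
  | cons hd tl ih =>
    obtain ⟨p', q'⟩ := hd
    simp only [pvTry] at h
    split at h
    · rename_i hc
      obtain ⟨rfl, rfl⟩ : q' = q ∧ l.drop p'.length = r := by simpa using h
      exact ⟨p', List.mem_cons_self, hc.1, List.isPrefixOf_iff_prefix.mp hc.2, rfl⟩
    · obtain ⟨p0, hmem, h1, h2, h3⟩ := ih h
      exact ⟨p0, List.mem_cons_of_mem _ hmem, h1, h2, h3⟩

theorem pvTry_append {t : List (List Char × List Char)} {p q : List Char}
    (hnp : List.Pairwise (fun a b => ¬ a.1 <+: b.1 ∧ ¬ b.1 <+: a.1) t)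
    (hmem : (p, q) ∈ t) (hp : p ≠ []) (m : List Char) :
    pvTry t (p ++ m) = some (q, m) := by
  induction t with
  | nil => cases hmem
  | cons hd tl ih =>
    obtain ⟨p', q'⟩ := hd
    rcases List.mem_cons.mp hmem with heq | hmem'
    · obtain ⟨rfl, rfl⟩ : p' = p ∧ q' = q := by simpa using heq.symm
      simp only [pvTry, hp, ne_eq, not_false_iff, true_and]
      rw [if_pos (List.isPrefixOf_iff_prefix.mpr (List.prefix_append _ m)), List.drop_left]
    · have hpair := (List.pairwise_cons.mp hnp).1 (p, q) hmem'
      have hguard : ¬ (p' ≠ [] ∧ p'.isPrefixOf (p ++ m) = true) := by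
        rintro ⟨-, hpre⟩
        rcases List.prefix_or_prefix_of_prefix
          (List.isPrefixOf_iff_prefix.mp hpre) (List.prefix_append p m) with h | h
        · exact hpair.1 h
        · exact hpair.2 h
      simp only [pvTry, if_neg hguard]
      exact ih (List.pairwise_cons.mp hnp).2 hmem'

-- the scanner copies a block none of whose characters begins a table phrase
theorem pvScan_append_safe (t : List (List Char × List Char))
    (ht : ∀ pr ∈ t, pr.1 ≠ []) (u m : List Char)
    (hu : ∀ pr ∈ t, ∀ c ∈ u, c ∉ pr.1) :
    pvScan t (u ++ m) = u ++ pvScan t m := by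
  induction u with
  | nil => simp
  | cons a u' ih =>
    have hnone : pvTry t (a :: (u' ++ m)) = none := by
      rw [pvTry_eq_none_iff ht]
      intro pr hpr hpre
      cases hP : pr.1 with
      | nil => exact ht pr hpr hP
      | cons d tl =>
        rw [hP] at hpre
        have hd : d = a := (List.cons_prefix_cons.mp hpre).1
        exact hu pr hpr a List.mem_cons_self (by rw [hP, hd]; exact List.mem_cons_self)
    rw [List.cons_append, pvScan_cons_none hnone,
      ih (fun pr hpr c hc => hu pr hpr c (List.mem_cons_of_mem _ hc))]
    rfl

-- a phrase-remainder that prefixes the single-pattern scan output prefixes the input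
theorem pvPrefix_transfer {p q B : List Char} (hp : p ≠ []) (hq : q ≠ [])
    (hB : ∀ c ∈ q, c ∉ B) :
    ∀ l k, B.drop k <+: pvScan [(p, q)] l → B.drop k <+: l := by
  intro l
  induction l with
  | nil =>
    intro k h
    rw [pvScan_nil, List.prefix_nil] at h
    rw [h]
  | cons c cs ih =>
    intro k h
    cases hBd : B.drop k with
    | nil => exact List.nil_prefix
    | cons d r =>
      by_cases hpre : p.isPrefixOf (c :: cs)
      · have htry : pvTry [(p, q)] (c :: cs) = some (q, (c :: cs).drop p.length) := by
          simp [pvTry, hp, hpre]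
        rw [pvScan_cons_some htry, hBd] at h
        obtain ⟨e, q', rfl⟩ : ∃ e q', q = e :: q' := by
          cases q with
          | nil => exact absurd rfl hq
          | cons e q' => exact ⟨e, q', rfl⟩
        have hd : d = e := (List.cons_prefix_cons.mp h).1
        have hdB : d ∈ B := List.mem_of_mem_drop (hBd ▸ List.mem_cons_self)
        exact absurd hdB (hd ▸ hB e List.mem_cons_self)
      · have htry : pvTry [(p, q)] (c :: cs) = none := by
          simp [pvTry, hp, hpre]
        rw [pvScan_cons_none htry, hBd] at h
        obtain ⟨hd, hr⟩ := List.cons_prefix_cons.mp h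
        have hrd : r = B.drop (k + 1) := by
          have h1 : B.drop (k + 1) = (B.drop k).drop 1 := by rw [List.drop_drop]
          rw [h1, hBd, List.drop_one, List.tail_cons]
        have := ih (k + 1) (hrd ▸ hr)
        exact List.cons_prefix_cons.mpr ⟨hd, hrd ▸ this⟩

-- the single-pattern scan copies a region in which the pattern never starts
theorem pvScan1_copy {p q : List Char} (hp : p ≠ []) :
    ∀ pi l, pi <+: l → (∀ j, j < pi.length → ¬ p <+: l.drop j) →
    pvScan [(p, q)] l = pi ++ pvScan [(p, q)] (l.drop pi.length) := by
  intro pi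
  induction pi with
  | nil => intro l _ _; simp
  | cons d pi' ih =>
    intro l hpre hnm
    cases l with
    | nil => rw [List.prefix_nil] at hpre; cases hpre
    | cons c l' =>
      obtain ⟨hd, hpre'⟩ := List.cons_prefix_cons.mp hpre
      have h0 : ¬ p <+: (c :: l') := by simpa using hnm 0 (by simp)
      have htry : pvTry [(p, q)] (c :: l') = none := by
        simp only [pvTry, hp, ne_eq, not_false_iff, true_and]
        rw [if_neg (by rw [List.isPrefixOf_iff_prefix]; exact h0)]
      rw [pvScan_cons_none htry,
        ih l' hpre' (fun j hj => by simpa using hnm (j + 1) (by simpa using hj))]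
      simp [hd]

theorem pvNot_infix_append_safe {B u Y : List Char} (hB : B ≠ [])
    (hu : ∀ c ∈ u, c ∉ B) (hY : ¬ B <:+: Y) : ¬ B <:+: u ++ Y := by
  induction u with
  | nil => simpa
  | cons a u' ih =>
    intro h
    rw [List.cons_append, List.infix_cons_iff] at h
    rcases h with h | h
    · cases B with
      | nil => exact hB rfl
      | cons b B' =>
        have hb : b = a := (List.cons_prefix_cons.mp h).1
        exact hu a List.mem_cons_self (hb ▸ List.mem_cons_self)
    · exact ih (fun c hc => hu c (List.mem_cons_of_mem _ hc)) h

-- a single-pattern pass creates no new occurrence of a replacement-free string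
theorem pvNobad_scan1 {p q B : List Char} (hp : p ≠ []) (hq : q ≠ []) (hB : B ≠ [])
    (hBq : ∀ c ∈ q, c ∉ B) :
    ∀ N l, l.length ≤ N → ¬ B <:+: l → ¬ B <:+: pvScan [(p, q)] l := by
  intro N
  induction N with
  | zero =>
    intro l hl h
    have : l = [] := List.length_eq_zero_iff.mp (Nat.le_zero.mp hl)
    subst this
    simpa [pvScan_nil]
  | succ N ih =>
    intro l hl h
    cases l with
    | nil => simpa [pvScan_nil]
    | cons c cs =>
      by_cases hpre : p.isPrefixOf (c :: cs)
      · have htry : pvTry [(p, q)] (c :: cs) = some (q, (c :: cs).drop p.length) := by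
          simp [pvTry, hp, hpre]
        rw [pvScan_cons_some htry]
        apply pvNot_infix_append_safe hB hBq
        apply ih
        · have hppos : 0 < p.length := List.length_pos_of_ne_nil hp
          simp only [List.length_drop, List.length_cons] at *
          omega
        · intro hx
          exact h (hx.trans (List.drop_suffix _ _).isInfix)
      · have htry : pvTry [(p, q)] (c :: cs) = none := by
          simp [pvTry, hp, hpre]
        rw [pvScan_cons_none htry]
        intro hin
        rw [List.infix_cons_iff] at hin
        rcases hin with hin | hin
        · have hBpre : B <+: pvScan [(p, q)] (c :: cs) := by
            rw [pvScan_cons_none htry]; exact hin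
          have := pvPrefix_transfer hp hq hBq (c :: cs) 0 (by simpa using hBpre)
          exact h (by simpa using this.isInfix)
        · have hcs : ¬ B <:+: cs := fun hx => h (List.infix_cons_iff.mpr (Or.inr hx))
          exact ih cs (by simpa using Nat.lt_succ_iff.mp (by simpa using hl)) hcs hin

-- FUSION: a single-pattern pass followed by a table scan is one scan with the pattern prepended
theorem pvFused {p q : List Char} {t : List (List Char × List Char)}
    (hp : p ≠ []) (hq : q ≠ [])
    (ht : ∀ pr ∈ t, pr.1 ≠ [])
    (hqt : ∀ pr ∈ t, ∀ c ∈ q, c ∉ pr.1)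
    (hnp : List.Pairwise (fun a b => ¬ a.1 <+: b.1 ∧ ¬ b.1 <+: a.1) t) :
    ∀ N l, l.length ≤ N →
    (∀ pr ∈ t, ∀ n j, pr.1 <+: l.drop n → 0 < j → j < pr.1.length → ¬ p <+: l.drop (n + j)) →
    pvScan t (pvScan [(p, q)] l) = pvScan ((p, q) :: t) l := by
  intro N
  induction N with
  | zero =>
    intro l hl _
    have : l = [] := List.length_eq_zero_iff.mp (Nat.le_zero.mp hl)
    subst this
    simp [pvScan_nil]
  | succ N ih =>
    intro l hl hov
    cases l with
    | nil => simp [pvScan_nil]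
    | cons c cs =>
      by_cases hpre : p.isPrefixOf (c :: cs)
      · -- p matches at the head: both sides emit q and continue after it
        have htry1 : pvTry [(p, q)] (c :: cs) = some (q, (c :: cs).drop p.length) := by
          simp [pvTry, hp, hpre]
        have htryC : pvTry ((p, q) :: t) (c :: cs) = some (q, (c :: cs).drop p.length) := by
          simp [pvTry, hp, hpre]
        rw [pvScan_cons_some htry1, pvScan_cons_some htryC,
          pvScan_append_safe t ht q _ (fun pr hpr => hqt pr hpr)]
        congr 1
        apply ih
        · have hppos : 0 < p.length := List.length_pos_of_ne_nil hp
          simp only [List.length_drop, List.length_cons] at *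
          omega
        · intro pr hpr n j h1 h2 h3
          have h1' : pr.1 <+: (c :: cs).drop (p.length + n) := by
            rwa [List.drop_drop] at h1
          have := hov pr hpr (p.length + n) j h1' h2 h3
          rwa [Nat.add_assoc, ← List.drop_drop] at this
      · have hnp0 : ¬ p <+: (c :: cs) := fun hx =>
          hpre (List.isPrefixOf_iff_prefix.mpr hx)
        cases htryt : pvTry t (c :: cs) with
        | some pr0 =>
          obtain ⟨qi, r⟩ := pr0
          obtain ⟨pp, hmem, hppne, hpppre, hr⟩ := pvTry_some_spec htryt
          -- the single-pattern pass copies the matched phrase pp verbatim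
          have hcopy : pvScan [(p, q)] (c :: cs) =
              pp ++ pvScan [(p, q)] ((c :: cs).drop pp.length) := by
            apply pvScan1_copy hp pp (c :: cs) hpppre
            intro j hj
            rcases Nat.eq_zero_or_pos j with rfl | hjp
            · simpa using hnp0
            · have := hov (pp, qi) hmem 0 j (by simpa using hpppre) hjp hj
              simpa using this
          rw [hcopy, pvScan_some (pvTry_append hnp hmem hppne _)]
          have htryC : pvTry ((p, q) :: t) (c :: cs) = some (qi, r) := by
            simp only [pvTry]
            rw [if_neg (by rintro ⟨-, hx⟩; exact hpre hx)]
            exact htryt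
          rw [pvScan_cons_some htryC, hr]
          congr 1
          apply ih
          · have hppos : 0 < pp.length := List.length_pos_of_ne_nil hppne
            simp only [List.length_drop, List.length_cons] at *
            omega
          · intro pr hpr n j h1 h2 h3
            have h1' : pr.1 <+: (c :: cs).drop (pp.length + n) := by
              rwa [List.drop_drop] at h1
            have := hov pr hpr (pp.length + n) j h1' h2 h3
            rwa [Nat.add_assoc, ← List.drop_drop] at this
        | none =>
          have htry1 : pvTry [(p, q)] (c :: cs) = none := by
            simp only [pvTry, hp, ne_eq, not_false_iff, true_and]
            rw [if_neg hpre]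
          have htn : pvTry t (c :: pvScan [(p, q)] cs) = none := by
            rw [pvTry_eq_none_iff ht]
            intro pr hpr hpre2
            have hx : pr.1 <+: pvScan [(p, q)] (c :: cs) := by
              rw [pvScan_cons_none htry1]; exact hpre2
            have := pvPrefix_transfer hp hq (hqt pr hpr) (c :: cs) 0 (by simpa using hx)
            exact (pvTry_eq_none_iff ht).mp htryt pr hpr (by simpa using this)
          have htryC : pvTry ((p, q) :: t) (c :: cs) = none := by
            simp only [pvTry]
            rw [if_neg (by rintro ⟨-, hx⟩; exact hpre hx)]
            exact htryt
          rw [pvScan_cons_none htry1, pvScan_cons_none htn, pvScan_cons_none htryC]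
          congr 1
          apply ih
          · simp only [List.length_cons] at hl; omega
          · intro pr hpr n j h1 h2 h3
            have h1' : pr.1 <+: (c :: cs).drop (n + 1) := by
              rwa [List.drop_succ_cons]
            have := hov pr hpr (n + 1) j h1' h2 h3
            have he : n + 1 + j = n + j + 1 := by omega
            rwa [he, List.drop_succ_cons] at this

theorem pvCompat_of_prefix_prefix {a b x : List Char} (ha : a <+: x) (hb : b <+: x) :
    a.take b.length = b.take a.length := by
  rcases List.prefix_or_prefix_of_prefix ha hb with h | h
  · rw [List.take_of_length_le h.length_le]
    exact List.prefix_iff_eq_take.mp h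
  · rw [List.take_of_length_le h.length_le]
    exact (List.prefix_iff_eq_take.mp h).symm

theorem pvNo_overlap_of_compat {p pi : List Char}
    (hc : ∀ j < pi.length, 0 < j → ¬ (p.take (pi.drop j).length = (pi.drop j).take p.length)) :
    ∀ (l : List Char) (n j : ℕ), pi <+: l.drop n → 0 < j → j < pi.length → ¬ p <+: l.drop (n + j) := by
  intro l n j hpi hj1 hj2 hp2
  have hdrop : pi.drop j <+: l.drop (n + j) := by
    obtain ⟨t, ht⟩ := hpi
    refine ⟨t, ?_⟩
    rw [← List.drop_drop, ← ht, List.drop_append,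
      Nat.sub_eq_zero_of_le (Nat.le_of_lt hj2), List.drop_zero]
  exact hc j hj2 hj1 (pvCompat_of_prefix_prefix hp2 hdrop)

theorem pvNo_overlap_conflict {p pi B : List Char} (hBpi : B = pi.dropLast ++ p)
    (hc : ∀ j < pi.length, 0 < j → j + 1 < pi.length → ¬ (p.take (pi.drop j).length = (pi.drop j).take p.length)) :
    ∀ (l : List Char), ¬ B <:+: l → ∀ (n j : ℕ), pi <+: l.drop n → 0 < j → j < pi.length → ¬ p <+: l.drop (n + j) := by
  intro l hB n j hpi hj1 hj2 hp2
  by_cases hj : j + 1 < pi.length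
  · have hdrop : pi.drop j <+: l.drop (n + j) := by
      obtain ⟨t, ht⟩ := hpi
      refine ⟨t, ?_⟩
      rw [← List.drop_drop, ← ht, List.drop_append,
        Nat.sub_eq_zero_of_le (Nat.le_of_lt hj2), List.drop_zero]
    exact hc j hj2 hj1 hj (pvCompat_of_prefix_prefix hp2 hdrop)
  · have hjeq : j = pi.length - 1 := by omega
    apply hB
    obtain ⟨t, ht⟩ := hpi
    have hdropj : l.drop (n + j) = pi.drop j ++ t := by
      rw [← List.drop_drop, ← ht, List.drop_append,
        Nat.sub_eq_zero_of_le (Nat.le_of_lt hj2), List.drop_zero]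
    have hdropn : l.drop n = pi.dropLast ++ (pi.drop j ++ t) := by
      rw [← ht, ← List.append_assoc]
      congr 1
      rw [List.dropLast_eq_take, hjeq]
      exact (List.take_append_drop _ _).symm
    have hBpre : B <+: l.drop n := by
      rw [hdropn, hBpi]
      obtain ⟨w, hw⟩ := hp2
      rw [hdropj] at hw
      exact ⟨w, by rw [List.append_assoc, hw]⟩
    exact hBpre.isInfix.trans (List.drop_suffix n l).isInfix

-- Python's str.replace IS the single-pattern scan
theorem pvReplace_go_eq {old new : List Char} (h : old ≠ []) :
    ∀ fuel l acc, l.length ≤ fuel →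
    PySem.Chars.replace.go old new fuel l acc = acc.reverse ++ pvScan [(old, new)] l := by
  intro fuel
  induction fuel with
  | zero =>
    intro l acc hl
    have : l = [] := List.length_eq_zero_iff.mp (Nat.le_zero.mp hl)
    subst this
    rw [PySem.Chars.replace.go.eq_def]
    simp [pvScan_nil]
  | succ fuel ih =>
    intro l acc hl
    cases l with
    | nil =>
      rw [PySem.Chars.replace.go.eq_def]
      simp [pvScan_nil]
    | cons c t =>
      rw [PySem.Chars.replace.go.eq_def]
      by_cases hpre : old.isPrefixOf (c :: t)
      · simp only [hpre, if_true]
        have hol : 0 < old.length := List.length_pos_of_ne_nil h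
        rw [ih _ _ (by simp only [List.length_drop, List.length_cons] at *; omega)]
        have htry : pvTry [(old, new)] (c :: t) = some (new, (c :: t).drop old.length) := by
          simp [pvTry, h, hpre]
        rw [pvScan_cons_some htry]
        simp [List.append_assoc]
      · simp only [hpre, if_false, Bool.false_eq_true]
        rw [ih _ _ (by simp only [List.length_cons] at hl; omega)]
        have htry : pvTry [(old, new)] (c :: t) = none := by
          simp [pvTry, h, hpre]
        rw [pvScan_cons_none htry]
        simp

theorem pvReplace_eq_scan {old new : List Char} (h : old ≠ []) (l : List Char) :
    PySem.Chars.replace l old new = pvScan [(old, new)] l := by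
  unfold PySem.Chars.replace
  rw [if_neg (by simpa [List.isEmpty_iff] using h)]
  rw [pvReplace_go_eq h l.length l [] le_rfl]
  simp

theorem pvBall_single {c0 : Char} {P : Char → Prop} (h : P c0) : ∀ c ∈ [c0], P c := by
  intro c hc
  have hc' : c = c0 := by simpa using hc
  subst hc'
  exact h

-- the five chained passes fuse into the one table scan, on overlap-free lines
theorem pvLine_eq (u : List Char) (hu : ∀ b ∈ pvBad, ¬ b <:+: u) :
    pvScan [(" damage at initiative ".toList, ",".toList)]
      (pvScan [(") with an attack that does ".toList, ",".toList)]
        (pvScan [(" hit points (".toList, ",".toList)]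
          (pvScan [(" units each with ".toList, ",".toList)]
            (pvScan [(", ".toList, "&".toList)] u)))) = pvScan pvTable u := by
  -- overlap strings stay absent through the early passes
  have hB1 : ¬ ") with an attack that does units each with ".toList <:+:
      pvScan [(", ".toList, "&".toList)] u :=
    pvNobad_scan1 (by decide) (by decide) (by decide) (pvBall_single (by decide)) u.length u le_rfl
      (hu _ (by decide))
  have hB3 : ¬ " damage at initiative units each with ".toList <:+:
      pvScan [(", ".toList, "&".toList)] u :=
    pvNobad_scan1 (by decide) (by decide) (by decide) (pvBall_single (by decide)) u.length u le_rfl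
      (hu _ (by decide))
  have hB2 : ¬ ") with an attack that does hit points (".toList <:+:
      pvScan [(" units each with ".toList, ",".toList)]
        (pvScan [(", ".toList, "&".toList)] u) :=
    pvNobad_scan1 (by decide) (by decide) (by decide) (pvBall_single (by decide)) _ _ le_rfl
      (pvNobad_scan1 (by decide) (by decide) (by decide) (pvBall_single (by decide)) u.length u le_rfl
        (hu _ (by decide)))
  have hB4 : ¬ " damage at initiative hit points (".toList <:+:
      pvScan [(" units each with ".toList, ",".toList)]
        (pvScan [(", ".toList, "&".toList)] u) :=
    pvNobad_scan1 (by decide) (by decide) (by decide) (pvBall_single (by decide)) _ _ le_rfl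
      (pvNobad_scan1 (by decide) (by decide) (by decide) (pvBall_single (by decide)) u.length u le_rfl
        (hu _ (by decide)))
  -- fuse pass 4 into pass 5 (no possible overlap)
  have s1 : ∀ l : List Char,
      pvScan [(" damage at initiative ".toList, ",".toList)]
        (pvScan [(") with an attack that does ".toList, ",".toList)] l) =
      pvScan [(") with an attack that does ".toList, ",".toList),
              (" damage at initiative ".toList, ",".toList)] l := by
    intro l
    apply pvFused (by decide) (by decide)
      (by intro pr hpr; fin_cases hpr <;> decide)
      (by intro pr hpr; refine pvBall_single ?_; fin_cases hpr <;> decide)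
      (by decide) l.length l le_rfl
    intro pr hpr n j h1 h2 h3
    have hpr' : pr = (" damage at initiative ".toList, ",".toList) := by simpa using hpr
    subst hpr'
    exact pvNo_overlap_of_compat (by decide) l n j h1 h2 h3
  -- fuse pass 3 (overlaps with passes 4/5 are excluded by Pre_)
  have s2 : pvScan [(") with an attack that does ".toList, ",".toList),
              (" damage at initiative ".toList, ",".toList)]
        (pvScan [(" hit points (".toList, ",".toList)]
          (pvScan [(" units each with ".toList, ",".toList)]
            (pvScan [(", ".toList, "&".toList)] u))) =
      pvScan [(" hit points (".toList, ",".toList),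
              (") with an attack that does ".toList, ",".toList),
              (" damage at initiative ".toList, ",".toList)]
        (pvScan [(" units each with ".toList, ",".toList)]
          (pvScan [(", ".toList, "&".toList)] u)) := by
    apply pvFused (by decide) (by decide)
      (by intro pr hpr; fin_cases hpr <;> decide)
      (by intro pr hpr; refine pvBall_single ?_; fin_cases hpr <;> decide)
      (by decide) _ _ le_rfl
    intro pr hpr n j h1 h2 h3
    have hpr' : pr = (") with an attack that does ".toList, ",".toList) ∨
        pr = (" damage at initiative ".toList, ",".toList) := by simpa using hpr
    rcases hpr' with rfl | rfl
    · exact pvNo_overlap_conflict (by decide) (by decide) _ hB2 n j h1 h2 h3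
    · exact pvNo_overlap_conflict (by decide) (by decide) _ hB4 n j h1 h2 h3
  -- fuse pass 2
  have s3 : pvScan [(" hit points (".toList, ",".toList),
              (") with an attack that does ".toList, ",".toList),
              (" damage at initiative ".toList, ",".toList)]
        (pvScan [(" units each with ".toList, ",".toList)]
          (pvScan [(", ".toList, "&".toList)] u)) =
      pvScan [(" units each with ".toList, ",".toList),
              (" hit points (".toList, ",".toList),
              (") with an attack that does ".toList, ",".toList),
              (" damage at initiative ".toList, ",".toList)]
        (pvScan [(", ".toList, "&".toList)] u) := by
    apply pvFused (by decide) (by decide)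
      (by intro pr hpr; fin_cases hpr <;> decide)
      (by intro pr hpr; refine pvBall_single ?_; fin_cases hpr <;> decide)
      (by decide) _ _ le_rfl
    intro pr hpr n j h1 h2 h3
    have hpr' : pr = (" hit points (".toList, ",".toList) ∨
        pr = (") with an attack that does ".toList, ",".toList) ∨
        pr = (" damage at initiative ".toList, ",".toList) := by simpa using hpr
    rcases hpr' with rfl | rfl | rfl
    · exact pvNo_overlap_of_compat (by decide) _ n j h1 h2 h3
    · exact pvNo_overlap_conflict (by decide) (by decide) _ hB1 n j h1 h2 h3
    · exact pvNo_overlap_conflict (by decide) (by decide) _ hB3 n j h1 h2 h3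
  -- fuse pass 1 (", " cannot start inside any other phrase)
  have s4 : ∀ l : List Char,
      pvScan [(" units each with ".toList, ",".toList),
              (" hit points (".toList, ",".toList),
              (") with an attack that does ".toList, ",".toList),
              (" damage at initiative ".toList, ",".toList)]
        (pvScan [(", ".toList, "&".toList)] l) = pvScan pvTable l := by
    intro l
    apply pvFused (by decide) (by decide)
      (by intro pr hpr; fin_cases hpr <;> decide)
      (by intro pr hpr; refine pvBall_single ?_; fin_cases hpr <;> decide)
      (by decide) l.length l le_rfl
    intro pr hpr n j h1 h2 h3
    have hpr' : pr = (" units each with ".toList, ",".toList) ∨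
        pr = (" hit points (".toList, ",".toList) ∨
        pr = (") with an attack that does ".toList, ",".toList) ∨
        pr = (" damage at initiative ".toList, ",".toList) := by simpa using hpr
    rcases hpr' with rfl | rfl | rfl | rfl
    · exact pvNo_overlap_of_compat (by decide) _ n j h1 h2 h3
    · exact pvNo_overlap_of_compat (by decide) _ n j h1 h2 h3
    · exact pvNo_overlap_of_compat (by decide) _ n j h1 h2 h3
    · exact pvNo_overlap_of_compat (by decide) _ n j h1 h2 h3
  rw [s1, s2, s3, s4]

-- every piece of a split is an infix of the input
theorem pvSplitOn_go_infix (sep : List Char) :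
    ∀ fuel l cur acc s, (cur.reverse ++ l) <:+: s → (∀ x ∈ acc, x <:+: s) →
    ∀ u ∈ PySem.Chars.splitOn.go sep fuel l cur acc, u <:+: s := by
  intro fuel
  induction fuel with
  | zero =>
    intro l cur acc s hcl hacc u hu
    rw [PySem.Chars.splitOn.go.eq_def] at hu
    simp only [List.mem_reverse, List.mem_cons] at hu
    rcases hu with rfl | hu
    · exact hcl
    · exact hacc u hu
  | succ fuel ih =>
    intro l cur acc s hcl hacc u hu
    rw [PySem.Chars.splitOn.go.eq_def] at hu
    cases l with
    | nil =>
      simp only [List.mem_reverse, List.mem_cons] at hu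
      rcases hu with rfl | hu
      · simpa using hcl
      · exact hacc u hu
    | cons c rest =>
      by_cases hpre : sep.isPrefixOf (c :: rest)
      · simp only [hpre, if_true] at hu
        have hlin : (c :: rest) <:+: s :=
          (List.suffix_append cur.reverse (c :: rest)).isInfix.trans hcl
        refine ih _ _ _ _ ?_ ?_ u hu
        · simpa using (List.drop_suffix sep.length (c :: rest)).isInfix.trans hlin
        · intro x hx
          rcases List.mem_cons.mp hx with rfl | hx'
          · exact ((cur.reverse).prefix_append (c :: rest)).isInfix.trans hcl
          · exact hacc x hx'
      · simp only [hpre, if_false, Bool.false_eq_true] at hu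
        refine ih _ _ _ _ ?_ hacc u hu
        rw [List.reverse_cons, List.append_assoc]
        simpa using hcl

theorem pvSplitOn_infix {l sep : List Char} : ∀ u ∈ PySem.Chars.splitOn l sep, u <:+: l := by
  unfold PySem.Chars.splitOn
  apply pvSplitOn_go_infix
  · simpa using List.infix_refl l
  · intro x hx
    cases hx

-- ===== VERDICT (by name: the statement is the Claim_ definition above) =====
theorem clean_unit_data_spec : Claim_equal_clean_unit_data := by
  unfold Claim_equal_clean_unit_data
  intro s _ hpre
  unfold Spec_clean_unit_data clean_unit_data clean_unit_data_alt
  have hs : PySem.Str.split? s "\n" =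
      some ((PySem.Chars.splitOn s.toList "\n".toList).map String.ofList) := by
    simp [PySem.Str.split?, PySem.Chars.split?]
  rw [hs]
  simp only [Option.getD_some]
  rw [← List.map_drop, List.map_map, List.map_map]
  apply List.map_congr_left
  intro v hv
  have hvinf : v <:+: s.toList := pvSplitOn_infix v (List.mem_of_mem_drop hv)
  have hbad : ∀ b ∈ pvBad, ¬ b <:+: v := fun b hb hx => hpre b hb (hx.trans hvinf)
  simp only [Function.comp, PySem.Str.replace, String.toList_ofList]
  congr 1
  rw [pvReplace_eq_scan (by decide), pvReplace_eq_scan (by decide),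
    pvReplace_eq_scan (by decide), pvReplace_eq_scan (by decide),
    pvReplace_eq_scan (by decide)]
  exact pvLine_eq v hbad
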